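-- pv_equiv track=rewrite | github.com/oigomezz/Retos | Hackerearth/Algorithms/Searching/Binary-Search/Maximum-Work/solution.py | solve
-- ===== SOURCE A (Python) =====
-- def solve(magical_pills, strength, workers, strength_workers, tasks, strength_required):
--     strength_required.sort()
--     strength_workers.sort()
--     s, e, val = 1, min(workers, tasks), 0
--     while s <= e:
--         mid = (s + e) // 2
--         req = 0
--         for i in range(mid):
--             req += (max(0, strength_required[i] - strength_workers[workers - (
--                 mid - i)]) + strength - 1) // strength
--         if req <= magical_pills:
--             val = mid
--             s = mid + 1
--         else:
--             e = mid - 1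
--     return val
-- ===== SOURCE B (Python) =====
-- def solve(magical_pills, strength, workers, strength_workers, tasks, strength_required):
--     req_sorted = sorted(strength_required)
--     wrk_sorted = sorted(strength_workers)
--     for m in range(min(workers, tasks), 0, -1):
--         need = sum((max(0, r - w) + strength - 1) // strength
--                    for r, w in zip(req_sorted[:m], wrk_sorted[workers - m:]))
--         if need <= magical_pills:
--             return m
--     return 0
-- ===== Notes on version B (the rewrite author's own statement) =====
-- stated objective: alternative
-- what changed: A's best-so-far binary search over the candidate count is replaced by a plain downward linear scan returning the first feasible count (correct because the cost is monotone in the count once both lists are sorted and strength is positive, which Pre_ requires), and A's indexed range(mid) feasibility loop with workers-(mid-i) arithmetic is replaced by a sum over zip of two slices; A sorts its list arguments in place, B leaves them untouched (equivalence is about the return value). …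
-- outside the precondition, e.g. on solve(-1, -1, 2, [5, -2, 0], 2, [4, 2]): A returns 0, B returns 2; on solve(0, 1, 4, [0, 0, 0, 0], 4, [5, 5]): A returns 0, B returns 0
import Mathlib
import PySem

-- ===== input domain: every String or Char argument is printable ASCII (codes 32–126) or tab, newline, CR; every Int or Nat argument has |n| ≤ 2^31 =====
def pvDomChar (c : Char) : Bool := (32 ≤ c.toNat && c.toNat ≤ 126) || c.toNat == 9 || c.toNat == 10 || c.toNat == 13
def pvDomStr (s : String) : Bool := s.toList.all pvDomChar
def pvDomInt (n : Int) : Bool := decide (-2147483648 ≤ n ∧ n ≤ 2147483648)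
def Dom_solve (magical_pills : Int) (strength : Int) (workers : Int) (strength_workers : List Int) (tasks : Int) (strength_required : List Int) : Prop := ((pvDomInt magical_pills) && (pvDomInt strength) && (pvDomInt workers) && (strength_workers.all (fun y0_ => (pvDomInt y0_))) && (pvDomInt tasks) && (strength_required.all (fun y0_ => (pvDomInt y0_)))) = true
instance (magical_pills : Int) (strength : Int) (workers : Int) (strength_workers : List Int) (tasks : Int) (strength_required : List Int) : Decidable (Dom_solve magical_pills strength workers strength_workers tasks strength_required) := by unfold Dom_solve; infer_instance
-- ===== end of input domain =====

-- B replaces A's binary search entirely by a downward linear scan over the candidate counts (correct because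
-- the pill cost is monotone in the count once both lists are sorted and strength is positive), and A's indexed
-- range(mid) feasibility loop by a sum over zip of two slices; Python A sorts its list arguments IN PLACE while
-- B does not mutate them — the equivalence proved here is about the return value.

-- ===== PORT A =====
-- A's inner `for i in range(mid): req += …` loop, as a named helper
def solveReq (strength workers : Int) (sw sr : List Int) (mid : Int) : Int :=
  (PySem.List.pyRange 0 mid 1).foldl
    (fun req i => req + PySem.Int.floordiv
      (max 0 (PySem.List.pyGetD sr i 0 - PySem.List.pyGetD sw (workers - (mid - i)) 0) + strength - 1)
      strength) 0

-- A's `while s <= e` loop over the state (s, e, val)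
def solveGo (magical_pills strength workers : Int) (sw sr : List Int) (s e val : Int) : Int :=
  if h : s ≤ e then
    let mid := PySem.Int.floordiv (s + e) 2
    if solveReq strength workers sw sr mid ≤ magical_pills then
      solveGo magical_pills strength workers sw sr (mid + 1) e mid
    else
      solveGo magical_pills strength workers sw sr s (mid - 1) val
  else val
termination_by (e + 1 - s).toNat
decreasing_by
  all_goals
    have hb := PySem.Int.floordiv_two_mid_bounds h
    omega

def solve (magical_pills : Int) (strength : Int) (workers : Int) (strength_workers : List Int) (tasks : Int) (strength_required : List Int) : Int :=
  let sr' := PySem.List.sorted strength_required (fun x => x) false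
  let sw' := PySem.List.sorted strength_workers (fun x => x) false
  solveGo magical_pills strength workers sw' sr' 1 (min workers tasks) 0

-- ===== PORT B =====
-- B's need(m): sum over zip(req_sorted[:m], wrk_sorted[workers-m:])
def altCost (strength workers : Int) (sw sr : List Int) (m : Int) : Int :=
  (((PySem.List.slice sr none (some m)).zip (PySem.List.slice sw (some (workers - m)) none)).map
    (fun p => PySem.Int.floordiv (max 0 (p.1 - p.2) + strength - 1) strength)).sum

-- B's `for m in range(min(workers, tasks), 0, -1): … return m` downward scan; fall-through returns 0
def altScan (magical_pills strength workers : Int) (sw sr : List Int) (m : Int) : Int :=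
  if h : 0 < m then
    if altCost strength workers sw sr m ≤ magical_pills then m
    else altScan magical_pills strength workers sw sr (m - 1)
  else 0
termination_by m.toNat
decreasing_by omega

def solve_alt (magical_pills : Int) (strength : Int) (workers : Int) (strength_workers : List Int) (tasks : Int) (strength_required : List Int) : Int :=
  let req_sorted := PySem.List.sorted strength_required (fun x => x) false
  let wrk_sorted := PySem.List.sorted strength_workers (fun x => x) false
  altScan magical_pills strength workers wrk_sorted req_sorted (min workers tasks)

-- ===== PRECONDITION & SPEC =====
-- Pre_ restricts to the natural domain: when any work is to be assigned (min(workers,tasks) ≥ 1), strength must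
-- be positive (a pill adds strength; with strength = 0 A raises ZeroDivisionError, and with negative strength
-- the ceiling formula is meaningless and A's binary search runs on a non-monotone cost, so its answer is an
-- accident of the probe order) and the worker/task counts must not exceed the lengths of the strength lists
-- (beyond them A raises IndexError on most inputs); B returns the natural maximal feasible count there.
def Pre_solve (magical_pills : Int) (strength : Int) (workers : Int) (strength_workers : List Int) (tasks : Int) (strength_required : List Int) : Prop :=
  1 ≤ min workers tasks →
    (1 ≤ strength ∧ workers ≤ (strength_workers.length : Int) ∧ min workers tasks ≤ (strength_required.length : Int))
instance (magical_pills : Int) (strength : Int) (workers : Int) (strength_workers : List Int) (tasks : Int) (strength_required : List Int) : Decidable (Pre_solve magical_pills strength workers strength_workers tasks strength_required) := by unfold Pre_solve; infer_instance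

def pvWitness_solve : Int × Int × Int × List Int × Int × List Int := (5, 2, 2, [3, 4], 2, [5, 6])

def Spec_solve (magical_pills : Int) (strength : Int) (workers : Int) (strength_workers : List Int) (tasks : Int) (strength_required : List Int) (out : Int) : Prop := out = solve_alt magical_pills strength workers strength_workers tasks strength_required
instance (magical_pills : Int) (strength : Int) (workers : Int) (strength_workers : List Int) (tasks : Int) (strength_required : List Int) (out : Int) : Decidable (Spec_solve magical_pills strength workers strength_workers tasks strength_required out) := by unfold Spec_solve; infer_instance

-- ===== CLAIM (what is proved, stated in full; the proofs are below) =====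
def Claim_equal_solve : Prop := ∀ (magical_pills : Int) (strength : Int) (workers : Int) (strength_workers : List Int) (tasks : Int) (strength_required : List Int), Dom_solve magical_pills strength workers strength_workers tasks strength_required → Pre_solve magical_pills strength workers strength_workers tasks strength_required → Spec_solve magical_pills strength workers strength_workers tasks strength_required (solve magical_pills strength workers strength_workers tasks strength_required)

-- ===== LEMMAS AND PROOFS =====

-- A's indexed feasibility loop computes B's zip-of-slices cost, for any in-range count mid.
lemma req_eq_cost (strength workers : Int) (sw sr : List Int) (mid : Int)
    (h1 : 1 ≤ mid) (h2 : mid ≤ workers) (hw : workers ≤ (sw.length : Int))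
    (hr : mid ≤ (sr.length : Int)) :
    solveReq strength workers sw sr mid = altCost strength workers sw sr mid := by
  unfold solveReq altCost
  rw [PySem.List.foldl_add, zero_add,
      PySem.List.slice_to sr (by omega : (0:Int) ≤ mid),
      PySem.List.slice_from sw (by omega : (0:Int) ≤ workers - mid)]
  congr 1
  apply List.ext_getElem
  · simp [PySem.List.length_pyRange_one]
    omega
  · intro i hi hi'
    have hilt : (i : Int) < mid := by
      simp [PySem.List.length_pyRange_one] at hi; omega
    have hisr : (i : Int) < (sr.length : Int) := by omega
    have hisw : workers - mid + (i : Int) < (sw.length : Int) := by omega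
    simp only [List.getElem_map, List.getElem_zip, List.getElem_take, List.getElem_drop,
      PySem.List.getElem_pyRange_one, zero_add]
    rw [PySem.List.pyGetD_eq_getElem sr 0 (by omega) (by omega),
        PySem.List.pyGetD_eq_getElem sw 0 (by omega : (0:Int) ≤ workers - (mid - (i:Int))) (by omega)]
    have e1 : ((i : Int)).toNat = i := by omega
    have e2 : (workers - (mid - (i : Int))).toNat = (workers - mid).toNat + i := by omega
    simp only [e1, e2]

-- each summand of the cost is a nonnegative ceiling (strength positive)
lemma term_nonneg (strength d : Int) (hK : 1 ≤ strength) :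
    0 ≤ PySem.Int.floordiv (max 0 d + strength - 1) strength := by
  rw [PySem.Int.floordiv_eq_ediv_of_pos (by omega)]
  exact Int.ediv_nonneg (by omega) (by omega)

-- the ceiling term is monotone in the deficit d (strength positive)
lemma term_mono (strength d d' : Int) (hK : 1 ≤ strength) (h : d ≤ d') :
    PySem.Int.floordiv (max 0 d + strength - 1) strength
      ≤ PySem.Int.floordiv (max 0 d' + strength - 1) strength := by
  rw [PySem.Int.floordiv_eq_ediv_of_pos (by omega),
      PySem.Int.floordiv_eq_ediv_of_pos (by omega)]
  exact Int.ediv_le_ediv (by omega) (by omega)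

-- assigning one more task (sorted lists, positive strength) can only increase A's pill requirement
lemma req_step (strength workers : Int) (sw sr : List Int) (m : Int)
    (hK : 1 ≤ strength) (hw : workers ≤ (sw.length : Int))
    (hmono : ∀ p q : Nat, p ≤ q → q < sw.length → sw[p]! ≤ sw[q]!)
    (h1 : 1 ≤ m) (h2 : m + 1 ≤ workers) :
    solveReq strength workers sw sr m ≤ solveReq strength workers sw sr (m + 1) := by
  unfold solveReq
  rw [PySem.List.foldl_add, PySem.List.foldl_add, zero_add, zero_add,
      PySem.List.pyRange_one_succ_right (by omega : (0:Int) ≤ m), List.map_append, List.sum_append]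
  have hlast : 0 ≤ ([m].map (fun i => PySem.Int.floordiv
      (max 0 (PySem.List.pyGetD sr i 0 - PySem.List.pyGetD sw (workers - (m + 1 - i)) 0) + strength - 1)
      strength)).sum := by
    simp only [List.map_cons, List.map_nil, List.sum_cons, List.sum_nil, add_zero]
    exact term_nonneg _ _ hK
  have hsum : ((PySem.List.pyRange 0 m 1).map (fun i => PySem.Int.floordiv
        (max 0 (PySem.List.pyGetD sr i 0 - PySem.List.pyGetD sw (workers - (m - i)) 0) + strength - 1)
        strength)).sum
      ≤ ((PySem.List.pyRange 0 m 1).map (fun i => PySem.Int.floordiv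
        (max 0 (PySem.List.pyGetD sr i 0 - PySem.List.pyGetD sw (workers - (m + 1 - i)) 0) + strength - 1)
        strength)).sum := by
    apply List.sum_le_sum
    intro i hi
    have hir : 0 ≤ i ∧ i < m := (PySem.List.mem_pyRange_one).mp hi
    apply term_mono _ _ _ hK
    have hgw : PySem.List.pyGetD sw (workers - (m + 1 - i)) 0
        ≤ PySem.List.pyGetD sw (workers - (m - i)) 0 := by
      rw [PySem.List.pyGetD_eq_getElem sw 0 (by omega) (by omega),
          PySem.List.pyGetD_eq_getElem sw 0 (by omega) (by omega)]
      have ha := hmono (workers - (m + 1 - i)).toNat (workers - (m - i)).toNat (by omega) (by omega)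
      rw [getElem!_pos sw _ (by omega), getElem!_pos sw _ (by omega)] at ha
      exact ha
    omega
  omega

-- hence the requirement is monotone over the whole feasible range of counts
lemma req_mono (strength workers : Int) (sw sr : List Int)
    (hK : 1 ≤ strength) (hw : workers ≤ (sw.length : Int))
    (hmono : ∀ p q : Nat, p ≤ q → q < sw.length → sw[p]! ≤ sw[q]!) :
    ∀ (k : Nat) (m m' : Int), (m' - m).toNat ≤ k → 1 ≤ m → m ≤ m' → m' ≤ workers →
      solveReq strength workers sw sr m ≤ solveReq strength workers sw sr m' := by
  intro k
  induction k with
  | zero =>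
    intro m m' hk h1 h2 h3
    have he : m = m' := by omega
    exact le_of_eq (congrArg _ he)
  | succ j ih =>
    intro m m' hk h1 h2 h3
    by_cases he : m = m'
    · exact le_of_eq (congrArg _ he)
    · have h4 : m + 1 ≤ m' := by omega
      calc solveReq strength workers sw sr m
          ≤ solveReq strength workers sw sr (m + 1) :=
            req_step strength workers sw sr m hK hw hmono h1 (by omega)
        _ ≤ solveReq strength workers sw sr m' := ih (m + 1) m' (by omega) (by omega) h4 h3

-- B's downward scan returns the unique x that is feasible (or 0) with everything above it infeasible
lemma scan_spec (magical_pills strength workers : Int) (sw sr : List Int) :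
    ∀ (n : Nat) (m0 x : Int), m0.toNat ≤ n → 0 ≤ x → x ≤ m0 →
      (x = 0 ∨ altCost strength workers sw sr x ≤ magical_pills) →
      (∀ m, x < m → m ≤ m0 → ¬ altCost strength workers sw sr m ≤ magical_pills) →
      altScan magical_pills strength workers sw sr m0 = x := by
  intro n
  induction n with
  | zero =>
    intro m0 x hn h0 hx hfeas htail
    rw [altScan]
    have : ¬ 0 < m0 := by omega
    simp only [this, dite_false]
    omega
  | succ k ih =>
    intro m0 x hn h0 hx hfeas htail
    rw [altScan]
    by_cases hpos : 0 < m0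
    · simp only [hpos, dite_true]
      by_cases hq : altCost strength workers sw sr m0 ≤ magical_pills
      · simp only [hq, if_true]
        by_contra hne
        exact htail m0 (by omega) (by omega) hq
      · simp only [hq, if_false]
        have hxlt : x ≤ m0 - 1 := by
          rcases hfeas with h | h
          · omega
          · by_contra hc
            have : x = m0 := by omega
            exact hq (this ▸ h)
        exact ih (m0 - 1) x (by omega) h0 hxlt hfeas
          (fun m hm1 hm2 => htail m hm1 (by omega))
    · simp only [hpos, dite_false]
      omega

-- A's best-so-far binary search: val tracks s-1, everything above e is infeasible (by monotonicity),
-- so the result is feasible (or 0) with everything above it infeasible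
lemma go_spec (magical_pills strength workers cap : Int) (sw sr : List Int)
    (hdown : ∀ m m', 1 ≤ m → m ≤ m' → m' ≤ cap →
      solveReq strength workers sw sr m' ≤ magical_pills →
      solveReq strength workers sw sr m ≤ magical_pills) :
    ∀ (n : Nat) (s e val : Int), (e + 1 - s).toNat ≤ n → 1 ≤ s → val = s - 1 →
      e ≤ cap → val ≤ cap →
      (val = 0 ∨ solveReq strength workers sw sr val ≤ magical_pills) →
      (∀ m, e < m → m ≤ cap → ¬ solveReq strength workers sw sr m ≤ magical_pills) →
      (0 ≤ solveGo magical_pills strength workers sw sr s e val ∧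
       solveGo magical_pills strength workers sw sr s e val ≤ cap ∧
       (solveGo magical_pills strength workers sw sr s e val = 0 ∨
        solveReq strength workers sw sr (solveGo magical_pills strength workers sw sr s e val) ≤ magical_pills) ∧
       (∀ m, solveGo magical_pills strength workers sw sr s e val < m → m ≤ cap →
         ¬ solveReq strength workers sw sr m ≤ magical_pills)) := by
  intro n
  induction n with
  | zero =>
    intro s e val hn hs hval he hvc hfeas htail
    rw [solveGo]
    have h : ¬ s ≤ e := by omega
    simp only [h, dite_false]
    exact ⟨by omega, hvc, hfeas, fun m hm1 hm2 => htail m (by omega) hm2⟩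
  | succ k ih =>
    intro s e val hn hs hval he hvc hfeas htail
    rw [solveGo]
    by_cases h : s ≤ e
    · have hb := PySem.Int.floordiv_two_mid_bounds h
      simp only [h, dite_true]
      by_cases hq : solveReq strength workers sw sr (PySem.Int.floordiv (s + e) 2) ≤ magical_pills
      · simp only [hq, if_true]
        exact ih (PySem.Int.floordiv (s + e) 2 + 1) e (PySem.Int.floordiv (s + e) 2)
          (by omega) (by omega) (by omega) he (by omega) (Or.inr hq) htail
      · simp only [hq, if_false]
        refine ih s (PySem.Int.floordiv (s + e) 2 - 1) val (by omega) hs hval (by omega) hvc hfeas ?_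
        intro m hm1 hm2
        by_cases hme : e < m
        · exact htail m hme hm2
        · intro hqm
          exact hq (hdown (PySem.Int.floordiv (s + e) 2) m (by omega) (by omega) hm2 hqm)
    · simp only [h, dite_false]
      exact ⟨by omega, hvc, hfeas, fun m hm1 hm2 => htail m (by omega) hm2⟩

-- ===== VERDICT (by name: the statement is the Claim_ definition above) =====
theorem solve_spec : Claim_equal_solve := by
  intro magical_pills strength workers strength_workers tasks strength_required _ hpre
  unfold Spec_solve solve solve_alt
  set sr' := PySem.List.sorted strength_required (fun x => x) false with hsr'
  set sw' := PySem.List.sorted strength_workers (fun x => x) false with hsw'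
  set cap := min workers tasks with hcap
  by_cases hc : 1 ≤ cap
  · obtain ⟨hK, hw0, hr0⟩ := hpre hc
    have hw : workers ≤ (sw'.length : Int) := by
      rw [hsw', PySem.List.length_sorted]; omega
    have hr : cap ≤ (sr'.length : Int) := by
      rw [hsr', PySem.List.length_sorted]; omega
    have hmono : ∀ p q : Nat, p ≤ q → q < sw'.length → sw'[p]! ≤ sw'[q]! := by
      intro p q hpq hq
      rw [getElem!_pos sw' _ (by omega : p < sw'.length), getElem!_pos sw' _ hq]
      exact PySem.List.sorted_id_getElem_mono strength_workers hpq hq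
    have hdown : ∀ m m', 1 ≤ m → m ≤ m' → m' ≤ cap →
        solveReq strength workers sw' sr' m' ≤ magical_pills →
        solveReq strength workers sw' sr' m ≤ magical_pills := by
      intro m m' h1 h2 h3 hq
      exact le_trans (req_mono strength workers sw' sr' hK hw hmono (m' - m).toNat m m'
        (le_refl _) h1 h2 (by omega)) hq
    obtain ⟨hr0', hrcap, hrfeas, hrtail⟩ :=
      go_spec magical_pills strength workers cap sw' sr' hdown cap.toNat 1 cap 0
        (by omega) (by omega) (by omega) (le_refl _) (by omega) (Or.inl rfl)
        (fun m hm1 hm2 => absurd (lt_of_lt_of_le hm1 hm2) (lt_irrefl _))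
    set r := solveGo magical_pills strength workers sw' sr' 1 cap 0 with hrdef
    have hbridge : ∀ m, 1 ≤ m → m ≤ cap →
        solveReq strength workers sw' sr' m = altCost strength workers sw' sr' m := by
      intro m h1 h2
      exact req_eq_cost strength workers sw' sr' m h1 (by omega) hw (by omega)
    refine (scan_spec magical_pills strength workers sw' sr' cap.toNat cap r (by omega) hr0' hrcap ?_ ?_).symm
    · rcases hrfeas with h | h
      · exact Or.inl h
      · by_cases hz : r = 0
        · exact Or.inl hz
        · exact Or.inr (by rw [← hbridge r (by omega) hrcap]; exact h)
    · intro m hm1 hm2 hq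
      exact hrtail m hm1 hm2 (by rw [hbridge m (by omega) hm2]; exact hq)
  · rw [solveGo, altScan]
    have h1 : ¬ (1:Int) ≤ cap := hc
    have h2 : ¬ (0:Int) < cap := by omega
    simp only [h1, h2, dite_false]
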